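-- pv_equiv track=rewrite | github.com/GOOHARY/partical-exam | dfa_contains_101.py | dfa_contains_101
-- ===== SOURCE A (Python) =====
-- def dfa_contains_101(binary_string):
--     state = 0
--     for bit in binary_string:
--         if state == 0:
--             state = 1 if bit == '1' else 0
--         elif state == 1:
--             state = 2 if bit == '0' else 1
--         elif state == 2:
--             state = 3 if bit == '1' else 0
--         elif state == 3:
--             state = 3  # once accepted, remain in accepting state
--     return state == 3
-- ===== SOURCE B (Python) =====
-- def dfa_contains_101(binary_string):
--     return '101' in binary_string
-- ===== Notes on version B (the rewrite author's own statement) =====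
-- stated objective: idiomatic
-- what changed: Replaces the explicit per-character DFA state loop with a single built-in substring membership test '101' in s.
-- intended difference: On strings containing a non-binary character in a '1<non-zeros>01' pattern without a literal '101' substring (e.g. '1_01'), A's else-branches keep it in state 1 and it wrongly returns True although the string does not contain '101'; B returns False, the intended answer for a '101'-containment check. — e.g. on dfa_contains_101("1_01"): A returns true, B returns false
import Mathlib
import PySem

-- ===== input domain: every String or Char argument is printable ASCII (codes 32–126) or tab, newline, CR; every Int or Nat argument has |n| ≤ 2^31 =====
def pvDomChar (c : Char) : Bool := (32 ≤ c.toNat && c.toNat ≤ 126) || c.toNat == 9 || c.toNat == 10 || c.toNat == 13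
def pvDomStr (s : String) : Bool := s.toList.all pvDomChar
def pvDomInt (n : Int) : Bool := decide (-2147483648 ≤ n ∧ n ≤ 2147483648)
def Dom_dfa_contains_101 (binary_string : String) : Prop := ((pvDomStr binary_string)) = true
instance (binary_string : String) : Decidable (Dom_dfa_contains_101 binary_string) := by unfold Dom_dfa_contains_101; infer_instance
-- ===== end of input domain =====

-- B replaces A's explicit DFA state loop with a single built-in substring test ('101' in s);
-- on non-binary strings matching 1[^0]*01 without a literal '101' A wrongly returns True, B returns False (see D_ below).

-- ===== PORT A =====
def pvStep (state : Int) (bit : Char) : Int :=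
  if state = 0 then (if bit = '1' then 1 else 0)
  else if state = 1 then (if bit = '0' then 2 else 1)
  else if state = 2 then (if bit = '1' then 3 else 0)
  else if state = 3 then 3
  else state

def dfa_contains_101 (binary_string : String) : Bool :=
  decide (binary_string.toList.foldl pvStep 0 = 3)

-- ===== PORT B =====
def dfa_contains_101_alt (binary_string : String) : Bool :=
  PySem.Str.isIn "101" binary_string

-- ===== PRECONDITION & SPEC =====
-- a '1' followed (to the stated bound) only by non-'0' characters
def pvSeen1 (l : List Char) : Prop :=
  ∃ i < l.length, l[i]? = some '1' ∧ ∀ k < l.length, i < k → l[k]? ≠ some '0'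

-- ends in '0' preceded by a '1' with no '0' in between (the DFA's "state 2" shape)
def pvSeen10 (l : List Char) : Prop :=
  l.getLast? = some '0' ∧ pvSeen1 l.dropLast

-- the string matches 1[^0]*01 somewhere
def pvPat (l : List Char) : Prop :=
  ∃ j < l.length, l[j]? = some '1' ∧ pvSeen10 (l.take j)

-- On strings containing a non-binary character inside a 1[^0]*01 pattern but no literal '101'
-- substring (e.g. "1_01"), A's else-branches keep it in state 1 and it wrongly returns True;
-- B returns False, the intended answer for a '101'-containment check.
def D_dfa_contains_101 (binary_string : String) : Prop :=
  pvPat binary_string.toList ∧ ¬ (['1', '0', '1'] <:+: binary_string.toList)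


-- ===== decision procedure for D_ (used only by its Decidable instance below) =====
-- one-pass Boolean check for pvPat: lb = last binary character strictly before the
-- previous character, p = the previous character; a pattern completes at a '1'
-- immediately preceded by '0' whose preceding binary character is '1'
def pvPatB (lb p : Option Char) : List Char → Bool
  | [] => false
  | c :: rest =>
    (decide (c = '1') && decide (p = some '0') && decide (lb = some '1')) ||
      pvPatB (if p = some '0' ∨ p = some '1' then p else lb) (some c) rest

-- one-pass Boolean check for a literal "101" substring
def pvSubB : List Char → Bool
  | [] => false
  | c :: rest =>
    (decide (c = '1') &&
      (match rest with | d :: e :: _ => decide (d = '0') && decide (e = '1') | _ => false)) ||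
      pvSubB rest

-- the DFA state determined by the scanner's (lb, p) bookkeeping (pre-acceptance)
def pvSt (lb p : Option Char) : Int :=
  if p = some '0' ∧ lb = some '1' then 2
  else if (if p = some '0' ∨ p = some '1' then p else lb) = some '1' then 1
  else 0

-- The one-directional DFA invariant: states stay in {0,1,2,3}, and each nonzero
-- state certifies the corresponding shape of the consumed input.
theorem pvInv (l : List Char) :
    (l.foldl pvStep 0 = 0 ∨ l.foldl pvStep 0 = 1 ∨ l.foldl pvStep 0 = 2 ∨ l.foldl pvStep 0 = 3) ∧
    (l.foldl pvStep 0 = 1 → pvSeen1 l) ∧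
    (l.foldl pvStep 0 = 2 → pvSeen10 l) ∧
    (l.foldl pvStep 0 = 3 → pvPat l) := by
  induction l using List.reverseRecOn with
  | nil => simp [pvSeen1, pvSeen10, pvPat]
  | append_singleton l c ih =>
    obtain ⟨hrange, h1, h2, h3⟩ := ih
    have hfold : (l ++ [c]).foldl pvStep 0 = pvStep (l.foldl pvStep 0) c := by
      simp [List.foldl_append]
    rcases hrange with h0 | hst1 | hst2 | hst3
    · -- state 0
      rw [hfold, h0]
      by_cases hc : c = '1'
      · subst hc
        refine ⟨by simp [pvStep], fun _ => ?_, fun h => by simp [pvStep] at h, fun h => by simp [pvStep] at h⟩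
        refine ⟨l.length, by simp, by simp, ?_⟩
        intro k hk hik
        simp at hk; omega
      · refine ⟨by simp [pvStep, hc], ?_, ?_, ?_⟩ <;> intro h <;> simp [pvStep, hc] at h
    · -- state 1
      rw [hfold, hst1]
      have hS1 := h1 hst1
      by_cases hc : c = '0'
      · subst hc
        refine ⟨by simp [pvStep], fun h => by simp [pvStep] at h, fun _ => ?_, fun h => by simp [pvStep] at h⟩
        exact ⟨by simp, by simpa using hS1⟩
      · refine ⟨by simp [pvStep, hc], fun _ => ?_, fun h => by simp [pvStep, hc] at h, fun h => by simp [pvStep, hc] at h⟩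
        obtain ⟨i, hi, hv, h0s⟩ := hS1
        refine ⟨i, by simp; omega, by rw [List.getElem?_append_left hi]; exact hv, ?_⟩
        intro k hk hik
        simp at hk
        rcases Nat.lt_or_ge k l.length with hkl | hkl
        · rw [List.getElem?_append_left hkl]; exact h0s k hkl hik
        · have : k = l.length := by omega
          subst this
          simp
          exact hc
    · -- state 2
      rw [hfold, hst2]
      have hS2 := h2 hst2
      by_cases hc : c = '1'
      · subst hc
        refine ⟨by simp [pvStep], fun h => by simp [pvStep] at h, fun h => by simp [pvStep] at h, fun _ => ?_⟩
        refine ⟨l.length, by simp, by simp, ?_⟩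
        simpa [List.take_left] using hS2
      · refine ⟨by simp [pvStep, hc], ?_, ?_, ?_⟩ <;> intro h <;> simp [pvStep, hc] at h
    · -- state 3
      rw [hfold, hst3]
      have hP := h3 hst3
      refine ⟨by simp [pvStep], fun h => by simp [pvStep] at h, fun h => by simp [pvStep] at h, fun _ => ?_⟩
      obtain ⟨j, hj, hv, hS⟩ := hP
      refine ⟨j, by simp; omega, by rw [List.getElem?_append_left hj]; exact hv, ?_⟩
      rwa [List.take_append_of_le_length (Nat.le_of_lt hj)]

-- in state 1, characters other than '0' leave the DFA in state 1
theorem pvRun1 (m : List Char) (h : ∀ c ∈ m, c ≠ '0') : m.foldl pvStep 1 = 1 := by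
  induction m with
  | nil => rfl
  | cons c m ih =>
    have hc : c ≠ '0' := h c (List.mem_cons_self ..)
    have := ih (fun d hd => h d (List.mem_cons_of_mem _ hd))
    simpa [pvStep, hc] using this

theorem pvStep3_absorb (t : List Char) : t.foldl pvStep 3 = 3 := by
  induction t with
  | nil => rfl
  | cons c t ih => simpa [pvStep] using ih

-- the converse direction: any 1[^0]*01 pattern drives the DFA into state 3
theorem pvPat_accept (l : List Char) (h : pvPat l) : l.foldl pvStep 0 = 3 := by
  obtain ⟨j, hj, hv, hlast, i, hi, hv1, h0⟩ := h
  obtain ⟨hjlt, hje⟩ := List.getElem?_eq_some_iff.mp hv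
  obtain ⟨hilt, hie⟩ := List.getElem?_eq_some_iff.mp hv1
  -- decompose l = u ++ '1' :: (m ++ '0' :: '1' :: r)
  set t : List Char := (l.take j).dropLast with ht
  set u : List Char := t.take i with hu
  set m : List Char := t.drop (i + 1) with hm
  set r : List Char := l.drop (j + 1) with hr
  have hne : l.take j ≠ [] := by
    intro he; rw [he] at hlast; simp at hlast
  have hsplit2 : t ++ ['0'] = l.take j := by
    have := List.dropLast_append_getLast hne
    rwa [show (l.take j).getLast hne = '0' from by
      have h2 := List.getLast?_eq_some_getLast (l := l.take j) hne
      rw [hlast] at h2; exact (Option.some_inj.mp h2).symm] at this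
  have hsplit3 : u ++ '1' :: m = t := by
    rw [hu, hm]
    rw [show ('1' : Char) = t[i] from hie.symm]
    rw [List.getElem_cons_drop, List.take_append_drop]
  have hsplit1 : l.take j ++ '1' :: r = l := by
    rw [hr, show ('1' : Char) = l[j] from hje.symm]
    rw [List.getElem_cons_drop, List.take_append_drop]
  have hmem : ∀ c ∈ m, c ≠ '0' := by
    intro c hc
    obtain ⟨k, hk, hke⟩ := List.mem_iff_getElem.mp hc
    have hb : i + 1 + k < t.length := by
      have hk' := hk; rw [hm] at hk'; simp at hk'; omega
    have hms : m[k]? = some c := by rw [List.getElem?_eq_getElem hk, hke]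
    have hts : t[i + 1 + k]? = some c := by
      rw [hm] at hms; rwa [List.getElem?_drop] at hms
    intro he
    exact h0 (i + 1 + k) hb (by omega) (by rw [hts, he])
  rw [← hsplit1, ← hsplit2, ← hsplit3]
  have hs := (pvInv u).1
  simp only [List.append_assoc, List.cons_append, List.foldl_append, List.foldl_cons,
    List.nil_append]
  rcases hs with h | h | h | h <;> rw [h]
  · rw [show pvStep 0 '1' = 1 from by simp [pvStep], pvRun1 m hmem,
      show pvStep 1 '0' = 2 from by simp [pvStep], show pvStep 2 '1' = 3 from by simp [pvStep],
      pvStep3_absorb]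
  · rw [show pvStep 1 '1' = 1 from by simp [pvStep], pvRun1 m hmem,
      show pvStep 1 '0' = 2 from by simp [pvStep], show pvStep 2 '1' = 3 from by simp [pvStep],
      pvStep3_absorb]
  · rw [show pvStep 2 '1' = 3 from by simp [pvStep], pvStep3_absorb,
      show pvStep 3 '0' = 3 from by simp [pvStep], show pvStep 3 '1' = 3 from by simp [pvStep],
      pvStep3_absorb]
  · rw [show pvStep 3 '1' = 3 from by simp [pvStep], pvStep3_absorb,
      show pvStep 3 '0' = 3 from by simp [pvStep], show pvStep 3 '1' = 3 from by simp [pvStep],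
      pvStep3_absorb]


theorem pvStep_pvSt (c : Char) (lb p : Option Char)
    (h : ¬(c = '1' ∧ p = some '0' ∧ lb = some '1')) :
    pvStep (pvSt lb p) c = pvSt (if p = some '0' ∨ p = some '1' then p else lb) (some c) := by
  by_cases hp0 : p = some '0' <;> by_cases hp1 : p = some '1' <;>
    by_cases hlb : lb = some '1' <;> by_cases hc1 : c = '1' <;> by_cases hc0 : c = '0' <;>
    simp_all [pvSt, pvStep]

theorem pvPatB_iff (rest : List Char) : ∀ (lb p : Option Char),
    (pvPatB lb p rest = true ↔ rest.foldl pvStep (pvSt lb p) = 3) := by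
  induction rest with
  | nil =>
    intro lb p
    simp only [pvPatB, List.foldl_nil, Bool.false_eq_true, false_iff]
    unfold pvSt; split_ifs <;> omega
  | cons c rest ih =>
    intro lb p
    by_cases hd : c = '1' ∧ p = some '0' ∧ lb = some '1'
    · obtain ⟨hc, hp, hlb⟩ := hd
      subst hc; subst hp; subst hlb
      simp only [pvPatB, List.foldl_cons]
      rw [show pvSt (some '1') (some '0') = 2 from by decide,
        show pvStep 2 '1' = 3 from by decide, pvStep3_absorb]
      simp
    · rw [show (c :: rest).foldl pvStep (pvSt lb p) =
          rest.foldl pvStep (pvSt (if p = some '0' ∨ p = some '1' then p else lb) (some c)) from by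
        rw [List.foldl_cons, pvStep_pvSt c lb p hd]]
      rw [← ih]
      simp only [pvPatB, Bool.or_eq_true, Bool.and_eq_true, decide_eq_true_eq]
      constructor
      · rintro (⟨⟨h1, h2⟩, h3⟩ | h)
        · exact absurd ⟨h1, h2, h3⟩ hd
        · exact h
      · exact Or.inr

theorem pvPatB_pat (l : List Char) : pvPatB none none l = true ↔ pvPat l := by
  rw [pvPatB_iff l none none, show pvSt none none = 0 from by decide]
  exact ⟨(pvInv l).2.2.2, pvPat_accept l⟩

theorem pvSubB_iff (l : List Char) : pvSubB l = true ↔ ['1', '0', '1'] <:+: l := by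
  induction l with
  | nil => simp [pvSubB]
  | cons c rest ih =>
    rw [List.infix_cons_iff, ← ih]
    cases rest with
    | nil => simp [pvSubB, List.cons_prefix_cons]
    | cons d r2 =>
      cases r2 with
      | nil => simp [pvSubB, List.cons_prefix_cons]
      | cons e r3 =>
        simp only [pvSubB, Bool.or_eq_true, Bool.and_eq_true, decide_eq_true_eq,
          List.cons_prefix_cons, List.nil_prefix, and_true]
        constructor
        · rintro (⟨h1, h2, h3⟩ | h)
          · exact Or.inl ⟨h1.symm, h2.symm, h3.symm⟩
          · exact Or.inr h
        · rintro (⟨h1, h2, h3⟩ | h)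
          · exact Or.inl ⟨h1.symm, h2.symm, h3.symm⟩
          · exact Or.inr h

instance (binary_string : String) : Decidable (D_dfa_contains_101 binary_string) :=
  decidable_of_iff (pvPatB none none binary_string.toList = true ∧
      ¬ pvSubB binary_string.toList = true)
    (by unfold D_dfa_contains_101
        exact and_congr (pvPatB_pat _) (not_congr (pvSubB_iff _)))

def Spec_dfa_contains_101 (binary_string : String) (out : Bool) : Prop :=
  ¬ D_dfa_contains_101 binary_string → out = dfa_contains_101_alt binary_string
instance (binary_string : String) (out : Bool) : Decidable (Spec_dfa_contains_101 binary_string out) := by unfold Spec_dfa_contains_101; infer_instance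

def pvDiffWitness_dfa_contains_101 : String := "1_01"
def pvDiffWitnessOut_dfa_contains_101 : Bool × Bool := (true, false)

-- ===== CLAIM (what is proved, stated in full; the proofs are below) =====
def Claim_unchanged_dfa_contains_101 : Prop := ∀ (binary_string : String), Dom_dfa_contains_101 binary_string → Spec_dfa_contains_101 binary_string (dfa_contains_101 binary_string)
def Claim_exact_dfa_contains_101 : Prop := ∀ (binary_string : String), Dom_dfa_contains_101 binary_string → D_dfa_contains_101 binary_string → dfa_contains_101 binary_string ≠ dfa_contains_101_alt binary_string
def Claim_changed_dfa_contains_101 : Prop := Dom_dfa_contains_101 (pvDiffWitness_dfa_contains_101) ∧ D_dfa_contains_101 (pvDiffWitness_dfa_contains_101) ∧ dfa_contains_101 (pvDiffWitness_dfa_contains_101) = pvDiffWitnessOut_dfa_contains_101.1 ∧ dfa_contains_101_alt (pvDiffWitness_dfa_contains_101) = pvDiffWitnessOut_dfa_contains_101.2 ∧ pvDiffWitnessOut_dfa_contains_101.1 ≠ pvDiffWitnessOut_dfa_contains_101.2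

-- ===== LEMMAS AND PROOFS =====

-- lemma used only by the verdict below
theorem pvInfix_accept (l : List Char) (h : ['1', '0', '1'] <:+: l) :
    l.foldl pvStep 0 = 3 := by
  obtain ⟨s, t, hst⟩ := h
  subst hst
  have hs := (pvInv s).1
  rw [List.foldl_append]
  rcases hs with h | h | h | h <;> rw [List.foldl_append, h] <;>
    simpa [pvStep] using pvStep3_absorb t


-- ===== VERDICT (by name: the statement is the Claim_ definition above) =====
theorem dfa_contains_101_spec : Claim_unchanged_dfa_contains_101 := by
  intro s _ hD
  unfold dfa_contains_101 dfa_contains_101_alt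
  by_cases h : ['1', '0', '1'] <:+: s.toList
  · have hA := pvInfix_accept s.toList h
    simp only [hA, decide_true]
    exact ((PySem.Str.isIn_iff_infix "101" s).mpr h).symm
  · have hA : s.toList.foldl pvStep 0 ≠ 3 := by
      intro h3
      exact hD ⟨(pvInv s.toList).2.2.2 h3, h⟩
    simp only [hA, decide_false]
    symm
    rw [Bool.eq_false_iff]
    intro hc
    exact h ((PySem.Str.isIn_iff_infix "101" s).mp hc)

theorem dfa_contains_101_changed : Claim_changed_dfa_contains_101 := by
  unfold Claim_changed_dfa_contains_101; decide

theorem dfa_contains_101_tight : Claim_exact_dfa_contains_101 := by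
  intro s _ hD
  obtain ⟨hp, hni⟩ := hD
  unfold dfa_contains_101 dfa_contains_101_alt
  have hA := pvPat_accept s.toList hp
  intro heq
  rw [show (decide (s.toList.foldl pvStep 0 = 3)) = true from by simp [hA]] at heq
  exact hni ((PySem.Str.isIn_iff_infix "101" s).mp heq.symm)
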